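-- pv_equiv track=rewrite | github.com/hypnoticOxbow/halp | pyhalp.py | strip_old_outputs
-- ===== SOURCE A (Python) =====
-- def strip_old_outputs(input_lines):
--     stripped = []
--     old_outputs = {}
--     for line in input_lines:
--         if line.startswith('#. '):
--             old_outputs.setdefault(len(stripped), []).append(line[len('#. '):])
--         else:
--             stripped.append(line)
--     return stripped, old_outputs
-- ===== SOURCE B (Python) =====
-- def strip_old_outputs(input_lines):
--     lines = list(input_lines)
--     stripped = []
--     old_outputs = {}
--     i = 0
--     n = len(lines)
--     while i < n:
--         if lines[i].startswith('#. '):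
--             # scan the whole maximal run of output lines; between two runs there is at
--             # least one kept line, so len(stripped) is a fresh key for each run and the
--             # run's entry can be assigned at once (no setdefault/append).
--             j = i + 1
--             while j < n and lines[j].startswith('#. '):
--                 j += 1
--             old_outputs[len(stripped)] = [l[len('#. '):] for l in lines[i:j]]
--             i = j
--         else:
--             stripped.append(lines[i])
--             i += 1
--     return stripped, old_outputs
-- ===== Notes on version B (the rewrite author's own statement) =====
-- stated objective: alternative
-- what changed: B is run-based: it scans each maximal run of consecutive '#. ' lines with an inner loop and assigns that whole run to the dict in one direct assignment (correct because at least one kept line separates runs, so len(stripped) is a fresh key per run), instead of A's per-line setdefault(...).append.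
import Mathlib
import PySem

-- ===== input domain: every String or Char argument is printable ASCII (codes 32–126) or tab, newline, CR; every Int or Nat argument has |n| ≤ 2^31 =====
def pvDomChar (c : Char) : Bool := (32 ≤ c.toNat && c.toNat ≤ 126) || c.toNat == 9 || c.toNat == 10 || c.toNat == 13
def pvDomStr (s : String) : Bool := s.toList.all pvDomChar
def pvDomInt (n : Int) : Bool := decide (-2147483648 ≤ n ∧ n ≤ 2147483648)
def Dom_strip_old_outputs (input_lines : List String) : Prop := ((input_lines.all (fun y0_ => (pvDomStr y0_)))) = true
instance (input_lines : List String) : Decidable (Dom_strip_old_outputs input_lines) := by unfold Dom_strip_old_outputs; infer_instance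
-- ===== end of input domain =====

-- B is run-based: each maximal run of consecutive '#. ' lines is scanned by an inner loop and
-- assigned to the dict in one direct assignment (keys are fresh per run); objective: alternative.

-- ===== PORT A =====
-- single loop carrying (stripped, old_outputs); setdefault(k, []).append(x) = Dict.modify k [] (· ++ [x])
def strip_old_outputs (input_lines : List String) : List String × (List (Int × List String)) :=
  let st := input_lines.foldl
    (fun (st : List String × PySem.Dict Int (List String)) line =>
      if PySem.Str.startswith line "#. " then
        (st.1, st.2.modify (Int.ofNat st.1.length) [] (· ++ [PySem.Str.slice line (some 3) none]))
      else
        (st.1 ++ [line], st.2))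
    ([], PySem.Dict.empty)
  (st.1, st.2.items)

-- ===== PORT B =====
-- Source B's outer while over the materialized lines: at an output line, the inner while scans the
-- maximal run (takeWhile / dropWhile = 'j += 1 while lines[j].startswith; lines[i:j]'), the whole
-- run is mapped and assigned with one direct dict assignment (Dict.insert); else the line is kept.
def sooIsOut (l : String) : Bool := PySem.Str.startswith l "#. "

def sooRuns : List String → List String → PySem.Dict Int (List String) → List String × PySem.Dict Int (List String)
  | [], stripped, d => (stripped, d)
  | l :: rest, stripped, d =>
    if sooIsOut l then
      sooRuns (rest.dropWhile sooIsOut) stripped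
        (d.insert (Int.ofNat stripped.length)
          ((l :: rest.takeWhile sooIsOut).map (fun x => PySem.Str.slice x (some 3) none)))
    else
      sooRuns rest (stripped ++ [l]) d
  termination_by ls _ _ => ls.length
  decreasing_by
    · have := List.length_dropWhile_le sooIsOut rest; simp; omega
    · simp

def strip_old_outputs_alt (input_lines : List String) : List String × (List (Int × List String)) :=
  let r := sooRuns input_lines [] PySem.Dict.empty
  (r.1, r.2.items)

-- ===== PRECONDITION & SPEC =====
def Spec_strip_old_outputs (input_lines : List String) (out : List String × (List (Int × List String))) : Prop := out = strip_old_outputs_alt input_lines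
instance (input_lines : List String) (out : List String × (List (Int × List String))) : Decidable (Spec_strip_old_outputs input_lines out) := by unfold Spec_strip_old_outputs; infer_instance

-- ===== CLAIM (what is proved, stated in full; the proofs are below) =====
def Claim_equal_strip_old_outputs : Prop := ∀ (input_lines : List String), Dom_strip_old_outputs input_lines → Spec_strip_old_outputs input_lines (strip_old_outputs input_lines)

-- ===== LEMMAS AND PROOFS =====

-- A's loop step, named for the lemmas below.
def sooStepA (st : List String × PySem.Dict Int (List String)) (line : String) :
    List String × PySem.Dict Int (List String) :=
  if PySem.Str.startswith line "#. " then
    (st.1, st.2.modify (Int.ofNat st.1.length) [] (· ++ [PySem.Str.slice line (some 3) none]))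
  else
    (st.1 ++ [line], st.2)

-- modify with default [] is insert of the extended value.
theorem soo_modify_eq_insert (d : PySem.Dict Int (List String)) (k : Int) (f : List String → List String) :
    d.modify k [] f = d.insert k (f (d.getD k [])) := by
  obtain ⟨l⟩ := d
  simp [PySem.Dict.modify, PySem.Dict.insert, PySem.Dict.getD, PySem.Dict.get?]

-- Folding A's append-modify at one key over a run, starting from d.insert c v, just extends v.
theorem soo_fold_run (c : Int) (rs : List String) :
    ∀ (d : PySem.Dict Int (List String)) (v : List String),
    rs.foldl (fun d x => d.modify c [] (· ++ [PySem.Str.slice x (some 3) none])) (d.insert c v)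
      = d.insert c (v ++ rs.map (fun x => PySem.Str.slice x (some 3) none)) := by
  induction rs with
  | nil => intro d v; simp
  | cons r rs ih =>
    intro d v
    simp only [List.foldl_cons, List.map_cons]
    rw [soo_modify_eq_insert, PySem.Dict.getD_insert_self, PySem.Dict.insert_insert_self, ih]
    simp

-- A's fold over a run of output lines keeps stripped fixed and folds the modifies.
theorem soo_foldA_run (run : List String) :
    ∀ (s : List String) (d : PySem.Dict Int (List String)),
    (∀ x ∈ run, sooIsOut x = true) →
    run.foldl sooStepA (s, d)
      = (s, run.foldl (fun d x => d.modify (Int.ofNat s.length) [] (· ++ [PySem.Str.slice x (some 3) none])) d) := by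
  induction run with
  | nil => intro s d _; rfl
  | cons r rs ih =>
    intro s d h
    have hr : sooIsOut r = true := h r (by simp)
    simp only [List.foldl_cons, sooStepA, sooIsOut] at hr ⊢
    rw [if_pos hr]
    exact ih s _ (fun x hx => h x (by simp [hx]))

-- Dicts whose keys are all naturals below s.length do not contain the key s.length.
theorem soo_not_contains (d : PySem.Dict Int (List String)) (s : List String)
    (h : ∀ k ∈ d.keys, ∃ m : ℕ, k = (m : Int) ∧ m < s.length) :
    d.contains (Int.ofNat s.length) = false := by
  by_contra hc
  have hc' : d.contains (Int.ofNat s.length) = true := by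
    cases hx : d.contains (Int.ofNat s.length) <;> simp_all
  have hk : (Int.ofNat s.length) ∈ d.keys := (PySem.Dict.contains_iff_mem_keys d _).mp hc'
  obtain ⟨m, hm, hlt⟩ := h _ hk
  simp only [Int.ofNat_eq_natCast, Nat.cast_inj] at hm
  omega

-- Main invariant: from a state whose dict keys are naturals < s.length,
-- A's fold equals B's run recursion.
theorem soo_main (n : ℕ) : ∀ (ls s : List String) (d : PySem.Dict Int (List String)),
    ls.length ≤ n →
    (∀ k ∈ d.keys, ∃ m : ℕ, k = (m : Int) ∧ m < s.length) →
    ls.foldl sooStepA (s, d) = sooRuns ls s d := by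
  induction n with
  | zero =>
    intro ls s d hlen _
    have : ls = [] := List.length_eq_zero_iff.mp (Nat.le_zero.mp hlen)
    subst this; simp [sooRuns]
  | succ n ih =>
    intro ls s d hlen hkeys
    match ls with
    | [] => simp [sooRuns]
    | l :: rest =>
      by_cases hl : sooIsOut l = true
      · -- output run
        have hsplit : rest.takeWhile sooIsOut ++ rest.dropWhile sooIsOut = rest :=
          List.takeWhile_append_dropWhile
        set run := rest.takeWhile sooIsOut with hrun
        set rest' := rest.dropWhile sooIsOut with hrest'
        have hstep : (l :: rest).foldl sooStepA (s, d)
            = rest'.foldl sooStepA ((l :: run).foldl sooStepA (s, d)) := by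
          rw [show l :: rest = (l :: run) ++ rest' by simp [hsplit], List.foldl_append]
        have hallrun : ∀ x ∈ l :: run, sooIsOut x = true := by
          intro x hx
          rcases List.mem_cons.mp hx with h1 | h2
          · subst h1; exact hl
          · exact List.mem_takeWhile_imp h2
        have hnc : d.contains (Int.ofNat s.length) = false := soo_not_contains d s hkeys
        have hfold : (l :: run).foldl sooStepA (s, d)
            = (s, d.insert (Int.ofNat s.length) ((l :: run).map (fun x => PySem.Str.slice x (some 3) none))) := by
          rw [soo_foldA_run _ s d hallrun]
          simp only [List.foldl_cons]
          rw [soo_modify_eq_insert, PySem.Dict.getD_of_not_contains _ _ hnc, soo_fold_run]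
          simp
        set d' := d.insert (Int.ofNat s.length) ((l :: run).map (fun x => PySem.Str.slice x (some 3) none)) with hd'
        have hkeys' : ∀ k ∈ d'.keys, ∃ m : ℕ, k = (m : Int) ∧ m < s.length + 1 := by
          intro k hk
          rcases (PySem.Dict.mem_keys_insert d _ _ _).mp hk with h1 | h1
          · exact ⟨s.length, by simp [h1], by omega⟩
          · obtain ⟨m, hm, hlt⟩ := hkeys k h1; exact ⟨m, hm, by omega⟩
        have hB : sooRuns (l :: rest) s d = sooRuns rest' s d' := by
          rw [sooRuns]; rw [if_pos hl]
        rw [hstep, hfold, hB]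
        match hre : rest' with
        | [] => simp [sooRuns]
        | l' :: rest'' =>
          have hl' : sooIsOut l' = false := by
            have := List.head?_dropWhile_not sooIsOut rest
            rw [← hrest'] at this; simpa using this
          have hlen' : rest''.length ≤ n := by
            have h1 : (l' :: rest'').length ≤ rest.length := by
              rw [hrest']; exact List.length_dropWhile_le sooIsOut rest
            simp at h1 hlen; omega
          have hstep2 : (l' :: rest'').foldl sooStepA (s, d') = rest''.foldl sooStepA (s ++ [l'], d') := by
            simp only [List.foldl_cons, sooStepA, sooIsOut] at hl' ⊢
            rw [if_neg (by simpa [PySem.Str.startswith] using hl')]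
          have hB2 : sooRuns (l' :: rest'') s d' = sooRuns rest'' (s ++ [l']) d' := by
            rw [sooRuns]; rw [if_neg (by simpa [PySem.Str.startswith] using hl')]
          rw [hstep2, hB2]
          refine ih rest'' (s ++ [l']) d' hlen' ?_
          intro k hk
          obtain ⟨m, hm, hlt⟩ := hkeys' k hk
          exact ⟨m, hm, by simp; omega⟩
      · -- kept line
        have hstep : (l :: rest).foldl sooStepA (s, d) = rest.foldl sooStepA (s ++ [l], d) := by
          simp only [List.foldl_cons, sooStepA, sooIsOut] at hl ⊢
          rw [if_neg (by simpa [PySem.Str.startswith] using hl)]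
        have hB : sooRuns (l :: rest) s d = sooRuns rest (s ++ [l]) d := by
          rw [sooRuns]; rw [if_neg hl]
        rw [hstep, hB]
        refine ih rest (s ++ [l]) d (by simp at hlen ⊢; omega) ?_
        intro k hk
        obtain ⟨m, hm, hlt⟩ := hkeys k hk
        exact ⟨m, hm, by simp; omega⟩

-- ===== VERDICT (by name: the statement is the Claim_ definition above) =====
theorem strip_old_outputs_spec : Claim_equal_strip_old_outputs := by
  intro input_lines _
  show _ = _
  unfold strip_old_outputs strip_old_outputs_alt
  have h := soo_main input_lines.length input_lines [] PySem.Dict.empty le_rfl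
    (by intro k hk; simp [PySem.Dict.keys_empty] at hk)
  simp only [show (fun (st : List String × PySem.Dict Int (List String)) line =>
      if PySem.Str.startswith line "#. " then
        (st.1, st.2.modify (Int.ofNat st.1.length) [] (· ++ [PySem.Str.slice line (some 3) none]))
      else
        (st.1 ++ [line], st.2)) = sooStepA from rfl]
  rw [h]
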